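-- pv_equiv track=rewrite | github.com/PrabhatkrBharti/MetaSearch | src/search_retrieval/search_agent.py | combine_critiques
-- ===== SOURCE A (Python) =====
-- def combine_critiques(reviews):
--     categories = ["Methodology", "Clarity", "Experiments", "Significance", "Novelty"]
--     categorized_critiques = {cat: [] for cat in categories}
--
--     for review in reviews:
--         for category, critiques in review.items():
--             if category in categorized_critiques:
--                 categorized_critiques[category].extend(critiques)
--
--     for category in categories:
--         categorized_critiques[category] = " ".join(categorized_critiques[category])
--
--     return categorized_critiques
-- ===== SOURCE B (Python) =====
-- def combine_critiques(reviews):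
--     categories = ["Methodology", "Clarity", "Experiments", "Significance", "Novelty"]
--     # One fold over a flattened (category, critique) event stream, building each
--     # category's joined string incrementally (None = nothing seen yet); no bucket
--     # lists, no separate join pass.
--     result = dict.fromkeys(categories)
--     for cat, critique in ((cat, c) for review in reviews
--                           for cat, cs in review.items() for c in cs):
--         if cat in result:
--             prev = result[cat]
--             result[cat] = critique if prev is None else prev + " " + critique
--     return {cat: (result[cat] if result[cat] is not None else "") for cat in categories}
-- ===== Notes on version B (the rewrite author's own statement) =====
-- stated objective: alternative
-- what changed: Instead of A's two-phase bucket index (dispatch every review's lists into per-category bucket lists, then a second pass joining each bucket), B flattens the input into a single stream of (category, critique) events and folds it once, growing each category's final joined string in place with a None sentinel for the separator; no intermediate lists and no join pass exist in B.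
import Mathlib
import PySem

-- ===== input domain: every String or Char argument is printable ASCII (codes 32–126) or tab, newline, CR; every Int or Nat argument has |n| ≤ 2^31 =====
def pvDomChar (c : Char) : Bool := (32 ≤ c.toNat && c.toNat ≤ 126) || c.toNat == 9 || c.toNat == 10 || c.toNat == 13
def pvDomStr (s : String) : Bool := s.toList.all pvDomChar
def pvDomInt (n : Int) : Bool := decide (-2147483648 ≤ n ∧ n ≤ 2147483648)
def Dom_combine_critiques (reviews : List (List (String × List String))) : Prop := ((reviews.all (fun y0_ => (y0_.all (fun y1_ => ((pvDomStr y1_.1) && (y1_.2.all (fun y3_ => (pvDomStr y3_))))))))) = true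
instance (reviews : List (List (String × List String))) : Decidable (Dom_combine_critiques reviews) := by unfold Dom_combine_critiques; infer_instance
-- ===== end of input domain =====

-- B replaces A's bucket-lists-then-join with ONE fold over a flattened (category, critique)
-- event stream that grows each category's joined string incrementally (Option sentinel);
-- an alternative algorithm of the same cost, no intermediate lists and no join pass.

-- ===== PORT A =====
def combine_critiques (reviews : List (List (String × List String))) : List (String × String) :=
  let categories : List String := ["Methodology", "Clarity", "Experiments", "Significance", "Novelty"]
  let d0 : PySem.Dict String (List String) :=
    categories.foldl (fun d c => d.insert c []) PySem.Dict.empty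
  let d1 : PySem.Dict String (List String) :=
    reviews.foldl (fun d review =>
      review.foldl (fun d kv =>
        if d.contains kv.1 then d.modify kv.1 [] (fun l => l ++ kv.2) else d) d) d0
  (categories.foldl (fun (r : PySem.Dict String String) c =>
      r.insert c (PySem.Str.join " " (d1.getD c []))) PySem.Dict.empty).items

-- ===== PORT B =====
-- 'critique if prev is None else prev + " " + critique' (None = nothing seen yet)
def joinStep (prev : Option String) (c : String) : Option String :=
  some (match prev with | none => c | some s => s ++ " " ++ c)

def combine_critiques_alt (reviews : List (List (String × List String))) : List (String × String) :=
  let categories : List String := ["Methodology", "Clarity", "Experiments", "Significance", "Novelty"]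
  let result0 : PySem.Dict String (Option String) :=
    categories.foldl (fun d c => d.insert c none) PySem.Dict.empty
  -- the flattened (category, critique) event stream
  let events : List (String × String) :=
    reviews.flatMap (fun review => review.flatMap (fun kv => kv.2.map (fun c => (kv.1, c))))
  let result : PySem.Dict String (Option String) :=
    events.foldl (fun d ev =>
      if d.contains ev.1 then d.modify ev.1 none (fun prev => joinStep prev ev.2) else d) result0
  (categories.foldl (fun (r : PySem.Dict String String) cat =>
      r.insert cat ((result.getD cat none).getD "")) PySem.Dict.empty).items

-- ===== PRECONDITION & SPEC =====
def Spec_combine_critiques (reviews : List (List (String × List String))) (out : List (String × String)) : Prop := out = combine_critiques_alt reviews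
instance (reviews : List (List (String × List String))) (out : List (String × String)) : Decidable (Spec_combine_critiques reviews out) := by unfold Spec_combine_critiques; infer_instance

-- ===== CLAIM (what is proved, stated in full; the proofs are below) =====
def Claim_equal_combine_critiques : Prop := ∀ (reviews : List (List (String × List String))), Dom_combine_critiques reviews → Spec_combine_critiques reviews (combine_critiques reviews)

-- ===== LEMMAS AND PROOFS =====

-- A side: the inner per-review dispatch loop neither adds nor removes keys
lemma contains_inner (review : List (String × List String))
    (d : PySem.Dict String (List String)) (c : String) :
    (review.foldl (fun d kv =>
      if d.contains kv.1 then d.modify kv.1 [] (fun l => l ++ kv.2) else d) d).contains c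
      = d.contains c := by
  induction review generalizing d with
  | nil => rfl
  | cons kv rest ih =>
    simp only [List.foldl_cons]
    by_cases h : d.contains kv.1
    · rw [if_pos h, ih, PySem.Dict.contains_modify]
      cases hbe : c == kv.1
      · simp
      · simp [(eq_of_beq hbe) ▸ h]
    · rw [if_neg h, ih]

-- A side: what one review contributes to category c's bucket
lemma getD_inner (review : List (String × List String))
    (d : PySem.Dict String (List String)) (c : String) (hc : d.contains c = true) :
    (review.foldl (fun d kv =>
      if d.contains kv.1 then d.modify kv.1 [] (fun l => l ++ kv.2) else d) d).getD c []
      = d.getD c [] ++ (review.filter (fun p => p.1 = c)).flatMap (·.2) := by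
  induction review generalizing d with
  | nil => simp
  | cons kv rest ih =>
    simp only [List.foldl_cons, List.filter_cons]
    by_cases hk : kv.1 = c
    · have hck : d.contains kv.1 = true := hk ▸ hc
      rw [if_pos hck, ih _ (by rw [PySem.Dict.contains_modify, hc]; simp)]
      simp [hk, List.append_assoc]
    · by_cases hck : d.contains kv.1 = true
      · rw [if_pos hck, ih _ (by rw [PySem.Dict.contains_modify, hc]; simp)]
        simp [PySem.Dict.getD_modify, Ne.symm hk, hk]
      · rw [if_neg (by simp [hck]), ih _ hc]
        simp [hk]

-- A side: bucket c collects, in review order, the critiques keyed c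
lemma getD_outer (reviews : List (List (String × List String)))
    (d : PySem.Dict String (List String)) (c : String) (hc : d.contains c = true) :
    (reviews.foldl (fun d review =>
      review.foldl (fun d kv =>
        if d.contains kv.1 then d.modify kv.1 [] (fun l => l ++ kv.2) else d) d) d).getD c []
      = d.getD c []
        ++ reviews.flatMap (fun r => (r.filter (fun p => p.1 = c)).flatMap (·.2)) := by
  induction reviews generalizing d with
  | nil => simp
  | cons review rest ih =>
    simp only [List.foldl_cons, List.flatMap_cons]
    rw [ih _ (by rw [contains_inner]; exact hc), getD_inner _ _ _ hc, List.append_assoc]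

-- B side: slot c of the event fold is the joinStep fold over the events keyed c
lemma getD_foldB (events : List (String × String))
    (d : PySem.Dict String (Option String)) (c : String) (hc : d.contains c = true) :
    (events.foldl (fun d ev =>
      if d.contains ev.1 then d.modify ev.1 none (fun prev => joinStep prev ev.2) else d) d).getD c none
      = ((events.filter (fun p => p.1 = c)).map (·.2)).foldl joinStep (d.getD c none) := by
  induction events generalizing d with
  | nil => simp
  | cons ev rest ih =>
    simp only [List.foldl_cons, List.filter_cons]
    by_cases hk : ev.1 = c
    · have hck : d.contains ev.1 = true := hk ▸ hc
      rw [if_pos hck, ih _ (by rw [PySem.Dict.contains_modify, hc]; simp)]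
      simp [hk]
    · by_cases hck : d.contains ev.1 = true
      · rw [if_pos hck, ih _ (by rw [PySem.Dict.contains_modify, hc]; simp)]
        simp [PySem.Dict.getD_modify, Ne.symm hk, hk]
      · rw [if_neg (by simp [hck]), ih _ hc]
        simp [hk]

-- B side: the events of one review keyed c carry exactly that review's critiques keyed c
lemma events_filter_one (review : List (String × List String)) (c : String) :
    ((review.flatMap (fun kv => kv.2.map (fun cr => (kv.1, cr)))).filter
        (fun p => p.1 = c)).map (·.2)
      = (review.filter (fun p => p.1 = c)).flatMap (·.2) := by
  induction review with
  | nil => simp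
  | cons kv rest ih =>
    simp only [List.flatMap_cons, List.filter_append, List.map_append, List.filter_cons, ih]
    by_cases hk : kv.1 = c
    · simp [hk, List.filter_map, Function.comp_def, List.map_map]
    · simp [hk, List.filter_map, Function.comp_def]

-- B side: …and over all reviews
lemma events_filter (reviews : List (List (String × List String))) (c : String) :
    ((reviews.flatMap (fun review =>
        review.flatMap (fun kv => kv.2.map (fun cr => (kv.1, cr))))).filter
        (fun p => p.1 = c)).map (·.2)
      = reviews.flatMap (fun r => (r.filter (fun p => p.1 = c)).flatMap (·.2)) := by
  induction reviews with
  | nil => simp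
  | cons review rest ih =>
    simp only [List.flatMap_cons, List.filter_append, List.map_append, ih, events_filter_one]

-- the incremental joinStep fold computes " ".join
lemma foldl_joinStep_some (cs : List String) (s : String) :
    cs.foldl joinStep (some s) = some (PySem.Str.join " " (s :: cs)) := by
  induction cs generalizing s with
  | nil => simp [PySem.Str.join]
  | cons c rest ih =>
    simp only [List.foldl_cons, joinStep, ih]
    congr 1
    apply String.toList_injective
    cases rest with
    | nil => simp [PySem.Str.join, PySem.Chars.join, List.intercalate]
    | cons r rs => simp [PySem.Str.join, PySem.Chars.join_cons_cons]

lemma foldl_joinStep (cs : List String) :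
    ((cs.foldl joinStep none).getD "") = PySem.Str.join " " cs := by
  cases cs with
  | nil => simp [PySem.Str.join]
  | cons c rest => simp [joinStep, foldl_joinStep_some]

-- per category: A's joined bucket equals B's incrementally built string
lemma cat_eq (reviews : List (List (String × List String))) (c : String)
    (dA : PySem.Dict String (List String)) (hcA : dA.contains c = true)
    (h0A : dA.getD c [] = [])
    (dB : PySem.Dict String (Option String)) (hcB : dB.contains c = true)
    (h0B : dB.getD c none = none) :
    PySem.Str.join " " ((reviews.foldl (fun d review =>
      review.foldl (fun d kv =>
        if d.contains kv.1 then d.modify kv.1 [] (fun l => l ++ kv.2) else d) d) dA).getD c [])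
    = (((reviews.flatMap (fun review =>
          review.flatMap (fun kv => kv.2.map (fun cr => (kv.1, cr))))).foldl (fun d ev =>
        if d.contains ev.1 then d.modify ev.1 none (fun prev => joinStep prev ev.2) else d) dB).getD c none).getD "" := by
  rw [getD_outer _ _ _ hcA, h0A, List.nil_append,
    getD_foldB _ _ _ hcB, h0B, foldl_joinStep, events_filter]

theorem combine_critiques_spec : Claim_equal_combine_critiques := by
  intro reviews _
  unfold Spec_combine_critiques combine_critiques combine_critiques_alt
  dsimp only
  rw [PySem.Dict.items_foldl_insert_fresh
    ["Methodology", "Clarity", "Experiments", "Significance", "Novelty"] (fun c => c) _ _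
    (by decide) (by decide),
    PySem.Dict.items_foldl_insert_fresh
    ["Methodology", "Clarity", "Experiments", "Significance", "Novelty"] (fun c => c) _ _
    (by decide) (by decide)]
  simp only [PySem.Dict.empty, List.nil_append, List.map_cons, List.map_nil]
  refine (by intros; simp_all : ∀ a b c d e a' b' c' d' e', a = a' → b = b' → c = c' → d = d' → e = e' →
    ([a, b, c, d, e] : List (String × String)) = [a', b', c', d', e']) _ _ _ _ _ _ _ _ _ _
    ?_ ?_ ?_ ?_ ?_ <;>
  · exact congrArg _ (cat_eq reviews _ _ (by decide) (by decide) _ (by decide) (by decide))
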